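-- pv_equiv track=rewrite | github.com/SudM/diff | Package_Toggle/policy_action_target_user_toggle.py | pick_single_condition_path
-- ===== SOURCE A (Python) =====
-- def pick_single_condition_path(cond_names):
--     targeting = [c for c in cond_names if c.startswith("POLICY.TARGETING")]
--     toggles = [c for c in cond_names if c.startswith("POLICY.TOGGLES")]
--
--     def longest_by_segments(cands):
--         return max(cands, key=lambda s: len(s.split("."))) if cands else ""
--
--     if targeting:
--         action_first = [c for c in targeting if ".ACTION." in c]
--         if action_first:
--             return longest_by_segments(action_first)
--         return longest_by_segments(targeting)
--     if toggles:
--         return longest_by_segments(toggles)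
--     return ""
-- ===== SOURCE B (Python) =====
-- def pick_single_condition_path(cond_names):
--     # One priority-keyed scan: rank 3 = targeting with ".ACTION.", 2 = targeting,
--     # 1 = toggles, others skipped; first maximum of (rank, segment count) wins.
--     best = None  # (key, name) with key = (rank, number_of_segments)
--     for c in cond_names:
--         if c.startswith("POLICY.TARGETING"):
--             rank = 3 if ".ACTION." in c else 2
--         elif c.startswith("POLICY.TOGGLES"):
--             rank = 1
--         else:
--             continue
--         key = (rank, len(c.split(".")))
--         if best is None or key > best[0]:
--             best = (key, c)
--     return best[1] if best is not None else ""
-- ===== Notes on version B (the rewrite author's own statement) =====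
-- stated objective: simpler
-- what changed: Replaces the three bucket lists plus branch-and-filter structure by a single pass that keeps the first element maximizing a lexicographic (priority, segment-count) key, with priority 3/2/1 for targeting-with-action/targeting/toggles.
import Mathlib
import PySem

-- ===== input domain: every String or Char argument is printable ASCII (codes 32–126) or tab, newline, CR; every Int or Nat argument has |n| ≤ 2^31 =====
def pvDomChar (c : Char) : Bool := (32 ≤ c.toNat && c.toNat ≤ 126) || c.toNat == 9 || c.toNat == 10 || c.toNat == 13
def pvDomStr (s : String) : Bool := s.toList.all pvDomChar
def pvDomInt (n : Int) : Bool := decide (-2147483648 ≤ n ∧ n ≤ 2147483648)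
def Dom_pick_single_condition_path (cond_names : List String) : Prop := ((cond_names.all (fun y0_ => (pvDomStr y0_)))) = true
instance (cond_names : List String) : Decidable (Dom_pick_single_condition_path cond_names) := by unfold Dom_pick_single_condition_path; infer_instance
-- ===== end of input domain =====

-- B replaces A's bucket lists and branch-and-filter structure by a single pass keeping
-- the first element maximizing a lexicographic (priority, segment-count) key (simpler).


-- len(s.split(".")), the Python primitive both sources apply
def pvSegCount (s : String) : Nat := ((PySem.Str.split? s ".").getD []).length

-- ===== PORT A =====
def pvLongestBySegments (cands : List String) : String :=
  match PySem.List.max? cands (fun s => pvSegCount s) with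
  | some m => m
  | none => ""
def pick_single_condition_path (cond_names : List String) : String :=
  let targeting := cond_names.filter (fun c => PySem.Str.startswith c "POLICY.TARGETING")
  let toggles := cond_names.filter (fun c => PySem.Str.startswith c "POLICY.TOGGLES")
  if targeting ≠ [] then
    let action_first := targeting.filter (fun c => PySem.Str.isIn ".ACTION." c)
    if action_first ≠ [] then pvLongestBySegments action_first
    else pvLongestBySegments targeting
  else if toggles ≠ [] then pvLongestBySegments toggles
  else ""

-- ===== PORT B =====
-- Python tuple '>' on a pair of ints: lexicographic strictly-greater
def pvKeyGt (a b : Nat × Nat) : Bool := b.1 < a.1 || (a.1 == b.1 && b.2 < a.2)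

-- 'if best is None or key > best[0]: best = (key, c)'
def pvUpd (best : Option ((Nat × Nat) × String)) (rank : Nat) (c : String) :
    Option ((Nat × Nat) × String) :=
  let key := (rank, pvSegCount c)
  match best with
  | none => some (key, c)
  | some b => if pvKeyGt key b.1 then some (key, c) else some b
def pick_single_condition_path_alt (cond_names : List String) : String :=
  let best := cond_names.foldl (fun best c =>
    if PySem.Str.startswith c "POLICY.TARGETING" then
      pvUpd best (if PySem.Str.isIn ".ACTION." c then 3 else 2) c
    else if PySem.Str.startswith c "POLICY.TOGGLES" then
      pvUpd best 1 c
    else best) none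
  match best with
  | some b => b.2
  | none => ""

-- ===== PRECONDITION & SPEC =====
def Spec_pick_single_condition_path (cond_names : List String) (out : String) : Prop := out = pick_single_condition_path_alt cond_names
instance (cond_names : List String) (out : String) : Decidable (Spec_pick_single_condition_path cond_names out) := by unfold Spec_pick_single_condition_path; infer_instance

-- ===== CLAIM (what is proved, stated in full; the proofs are below) =====
def Claim_equal_pick_single_condition_path : Prop := ∀ (cond_names : List String), Dom_pick_single_condition_path cond_names → Spec_pick_single_condition_path cond_names (pick_single_condition_path cond_names)

-- ===== LEMMAS AND PROOFS =====

def pvRank (c : String) : Nat :=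
  if PySem.Str.startswith c "POLICY.TARGETING" then
    (if PySem.Str.isIn ".ACTION." c then 3 else 2)
  else if PySem.Str.startswith c "POLICY.TOGGLES" then 1 else 0
def pvKey (c : String) : Nat × Nat := (pvRank c, pvSegCount c)
def pvChain (zs : List String) : String :=
  let f3 := zs.filter (fun c => pvRank c == 3)
  let f23 := zs.filter (fun c => decide (2 ≤ pvRank c))
  let f1 := zs.filter (fun c => pvRank c == 1)
  if f23 ≠ [] then (if f3 ≠ [] then pvLongestBySegments f3 else pvLongestBySegments f23)
  else if f1 ≠ [] then pvLongestBySegments f1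
  else ""
theorem pvRank_cases (c : String) :
    pvRank c = 0 ∨ pvRank c = 1 ∨ pvRank c = 2 ∨ pvRank c = 3 := by
  unfold pvRank; split_ifs <;> simp
theorem pvL2a (m y : String) (l : List String) (hs : pvSegCount m < pvSegCount y) :
    pvLongestBySegments (m :: y :: l) = pvLongestBySegments (y :: l) := by
  simp [pvLongestBySegments, PySem.List.max?, hs]
theorem pvL2b (m y : String) (l : List String) (hs : ¬ pvSegCount m < pvSegCount y) :
    pvLongestBySegments (m :: y :: l) = pvLongestBySegments (m :: l) := by
  simp [pvLongestBySegments, PySem.List.max?, hs]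
set_option maxHeartbeats 1000000 in
theorem pvChain_cons2 (m y : String) (t : List String)
    (hm : 1 ≤ pvRank m) (hy : 1 ≤ pvRank y) :
    pvChain (m :: y :: t) =
      pvChain ((if pvKeyGt (pvKey y) (pvKey m) then y else m) :: t) := by
  by_cases hs : pvSegCount m < pvSegCount y <;>
  rcases pvRank_cases m with ha | ha | ha | ha <;> rcases pvRank_cases y with hb | hb | hb | hb <;>
    simp [ha, hb] at hm hy ⊢ <;>
    simp [pvChain, pvKeyGt, pvKey, ha, hb, hs] <;>
    (try split_ifs) <;>
      first
        | rfl
        | exact pvL2a m y _ hs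
        | exact pvL2b m y _ hs

theorem pvFold_chain (zs : List String) : ∀ (m : String),
    (∀ c ∈ zs, pvRank c ≠ 0) → 1 ≤ pvRank m →
    (match zs.foldl (fun b c => pvUpd b (pvRank c) c) (some (pvKey m, m)) with
      | some b => b.2 | none => "") = pvChain (m :: zs) := by
  induction zs with
  | nil =>
    intro m _ hm
    rcases pvRank_cases m with ha | ha | ha | ha
    · omega
    all_goals simp [pvChain, pvLongestBySegments, PySem.List.max?, ha]
  | cons y t ih =>
    intro m hzs hm
    have hy : pvRank y ≠ 0 := hzs y (by simp)
    have ht : ∀ c ∈ t, pvRank c ≠ 0 := fun c hc => hzs c (by simp [hc])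
    have hstep : pvUpd (some (pvKey m, m)) (pvRank y) y
        = some (pvKey (if pvKeyGt (pvKey y) (pvKey m) then y else m),
                (if pvKeyGt (pvKey y) (pvKey m) then y else m)) := by
      by_cases h : pvKeyGt (pvKey y) (pvKey m) <;> simp only [pvKey] at h ⊢ <;> simp [pvUpd, h]
    simp only [List.foldl_cons]
    rw [hstep, ih _ ht (by by_cases h : pvKeyGt (pvKey y) (pvKey m) <;> simp [h] <;> omega)]
    exact (pvChain_cons2 m y t hm (by omega)).symm

theorem pvHT (c : String) :
    PySem.Str.startswith c "POLICY.TARGETING" = decide (2 ≤ pvRank c) := by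
  by_cases h1 : PySem.Str.startswith c "POLICY.TARGETING" <;>
  by_cases h2 : PySem.Str.isIn ".ACTION." c <;>
  by_cases h3 : PySem.Str.startswith c "POLICY.TOGGLES" <;>
    (simp only [pvRank]; simp_all)

theorem pvNoBoth (c : String) (h1 : PySem.Str.startswith c "POLICY.TARGETING" = true)
    (h3 : PySem.Str.startswith c "POLICY.TOGGLES" = true) : False := by
  have p1 : "POLICY.TARGETING".toList <+: c.toList := by
    have := h1; simp only [PySem.Str.startswith_eq] at this
    exact (PySem.Chars.startswith_iff _ _).mp this
  have p2 : "POLICY.TOGGLES".toList <+: c.toList := by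
    have := h3; simp only [PySem.Str.startswith_eq] at this
    exact (PySem.Chars.startswith_iff _ _).mp this
  have := List.prefix_of_prefix_length_le p2 p1 (by decide)
  exact absurd this (by decide)

theorem pvHG (c : String) :
    PySem.Str.startswith c "POLICY.TOGGLES" = (pvRank c == 1) := by
  by_cases h1 : PySem.Str.startswith c "POLICY.TARGETING" <;>
  by_cases h2 : PySem.Str.isIn ".ACTION." c <;>
  by_cases h3 : PySem.Str.startswith c "POLICY.TOGGLES" <;>
    first
      | exact absurd (pvNoBoth c h1 h3) (by simp)
      | (simp only [pvRank]; simp_all)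

theorem pvHA (c : String) :
    (decide (2 ≤ pvRank c) && PySem.Str.isIn ".ACTION." c) = (pvRank c == 3) := by
  by_cases h1 : PySem.Str.startswith c "POLICY.TARGETING" <;>
  by_cases h2 : PySem.Str.isIn ".ACTION." c <;>
  by_cases h3 : PySem.Str.startswith c "POLICY.TOGGLES" <;>
    (simp only [pvRank]; simp_all)

theorem pvA_chain (cond : List String) :
    (let targeting := cond.filter (fun c => PySem.Str.startswith c "POLICY.TARGETING")
     let toggles := cond.filter (fun c => PySem.Str.startswith c "POLICY.TOGGLES")
     if targeting ≠ [] then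
       let action_first := targeting.filter (fun c => PySem.Str.isIn ".ACTION." c)
       if action_first ≠ [] then pvLongestBySegments action_first
       else pvLongestBySegments targeting
     else if toggles ≠ [] then pvLongestBySegments toggles
     else "") = pvChain cond := by
  have e1 : cond.filter (fun c => PySem.Str.startswith c "POLICY.TARGETING")
      = cond.filter (fun c => decide (2 ≤ pvRank c)) :=
    List.filter_congr (fun c _ => pvHT c)
  have e2 : cond.filter (fun c => PySem.Str.startswith c "POLICY.TOGGLES")
      = cond.filter (fun c => pvRank c == 1) :=
    List.filter_congr (fun c _ => pvHG c)
  have e3 : (cond.filter (fun c => decide (2 ≤ pvRank c))).filter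
        (fun c => PySem.Str.isIn ".ACTION." c)
      = cond.filter (fun c => pvRank c == 3) := by
    rw [List.filter_filter]
    exact List.filter_congr (fun c _ => by
      rw [Bool.and_comm]; exact pvHA c)
  simp only [pvChain, e1, e2, e3]

theorem pvChain_filter (cond : List String) :
    pvChain (cond.filter (fun c => pvRank c != 0)) = pvChain cond := by
  have h : ∀ (q : String → Bool), (∀ c, q c = true → pvRank c ≠ 0) →
      (cond.filter (fun c => pvRank c != 0)).filter q = cond.filter q := by
    intro q hq
    rw [List.filter_filter]
    exact List.filter_congr (fun c _ => by
      by_cases h : q c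
      · simp [h, hq c h]
      · simp [h])
  simp only [pvChain]
  rw [h (fun c => pvRank c == 3) (fun c hc => by simp at hc; omega),
      h (fun c => decide (2 ≤ pvRank c)) (fun c hc => by simp at hc; omega),
      h (fun c => pvRank c == 1) (fun c hc => by simp at hc; omega)]

theorem pvMain (cond : List String) :
    pick_single_condition_path cond = pick_single_condition_path_alt cond := by
  have hA : pick_single_condition_path cond = pvChain cond := pvA_chain cond
  have hfun : (fun (b : Option ((Nat × Nat) × String)) (c : String) =>
      if PySem.Str.startswith c "POLICY.TARGETING" then
        pvUpd b (if PySem.Str.isIn ".ACTION." c then 3 else 2) c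
      else if PySem.Str.startswith c "POLICY.TOGGLES" then
        pvUpd b 1 c
      else b)
      = fun b c => if (pvRank c != 0) then pvUpd b (pvRank c) c else b := by
    funext b c
    by_cases h1 : PySem.Str.startswith c "POLICY.TARGETING" <;>
    by_cases h2 : PySem.Str.isIn ".ACTION." c <;>
    by_cases h3 : PySem.Str.startswith c "POLICY.TOGGLES" <;>
      (simp only [pvRank]; simp_all)
  rw [hA, pick_single_condition_path_alt, hfun, ← List.foldl_filter]
  cases hzs : cond.filter (fun c => pvRank c != 0) with
  | nil =>
    have : pvChain cond = pvChain [] := by rw [← pvChain_filter cond, hzs]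
    rw [this]; rfl
  | cons z rest =>
    have hall : ∀ c ∈ z :: rest, (pvRank c != 0) = true := by
      intro c hc
      have hc' : c ∈ cond.filter (fun c => pvRank c != 0) := hzs ▸ hc
      exact (List.mem_filter.mp hc').2
    have hz : 1 ≤ pvRank z := by
      have := hall z (by simp); simp at this; omega
    have ht : ∀ c ∈ rest, pvRank c ≠ 0 := by
      intro c hc
      have := hall c (by simp [hc]); simpa using this
    have hfold := pvFold_chain rest z ht hz
    simp only [List.foldl_cons]
    have hinit : pvUpd none (pvRank z) z = some (pvKey z, z) := rfl
    rw [hinit, hfold, ← pvChain_filter cond, hzs]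

-- ===== VERDICT (by name: the statement is the Claim_ definition above) =====
theorem pick_single_condition_path_spec : Claim_equal_pick_single_condition_path := by
  intro cond_names _
  unfold Spec_pick_single_condition_path
  exact pvMain cond_names
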